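-- pv_equiv track=rewrite | github.com/124c/strategy_reviews | caldeira_moura_2013/caldeira_moura.py | get_position_numbers
-- ===== SOURCE A (Python) =====
-- def get_position_numbers(signal_list):
--     posnums = [0]
--     posnum = 0
--     for i in range(1, len(signal_list)):
--         if signal_list[i] == 0:
--             posnums.append(0)
--         else: # two cases: 11, 01, otherwise 0
--             if signal_list[i-1] == 0:
--                 posnum+=1
--             else:
--                 posnum+=0
--             posnums.append(posnum)
--     return posnums
-- ===== SOURCE B (Python) =====
-- def get_position_numbers(signal_list):
--     n = len(signal_list)
--     # rise[k] == 1 iff a 0 -> nonzero transition happens at index k+1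
--     rise = [1 if signal_list[i] != 0 and signal_list[i - 1] == 0 else 0
--             for i in range(1, n)]
--     # prefix[k] = number of rises up to and including index k+1
--     prefix = []
--     s = 0
--     for r in rise:
--         s += r
--         prefix.append(s)
--     return [0] + [0 if signal_list[i] == 0 else prefix[i - 1]
--                   for i in range(1, n)]
-- ===== Notes on version B (the rewrite author's own statement) =====
-- stated objective: alternative
-- what changed: Replaces the single stateful loop carrying a running counter and growing output with three passes: a transition (rise) indicator list, its prefix-sum table, and a final map that reads the table.
import Mathlib
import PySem

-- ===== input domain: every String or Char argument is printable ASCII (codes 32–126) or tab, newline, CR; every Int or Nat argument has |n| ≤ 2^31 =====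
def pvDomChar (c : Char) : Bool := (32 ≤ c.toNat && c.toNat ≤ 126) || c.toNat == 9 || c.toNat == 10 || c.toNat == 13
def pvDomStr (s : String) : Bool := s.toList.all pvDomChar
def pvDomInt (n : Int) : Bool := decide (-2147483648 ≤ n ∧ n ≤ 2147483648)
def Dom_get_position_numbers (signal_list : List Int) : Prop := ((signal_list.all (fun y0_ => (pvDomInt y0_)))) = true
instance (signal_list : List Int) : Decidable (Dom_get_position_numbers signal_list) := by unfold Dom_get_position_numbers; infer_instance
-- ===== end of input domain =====

-- B replaces A's single stateful loop (running counter + growing output) by three passes: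
-- a rise-indicator list, its prefix-sum table, and a final map reading that table ("alternative").

-- ===== PORT A =====
def get_position_numbers (signal_list : List Int) : List Int :=
  ((PySem.List.pyRange 1 signal_list.length).foldl
    (fun (st : List Int × Int) i =>
      if PySem.List.pyGetD signal_list i 0 = 0 then (st.1 ++ [(0 : Int)], st.2)
      else
        let posnum := if PySem.List.pyGetD signal_list (i - 1) 0 = 0 then st.2 + 1 else st.2
        (st.1 ++ [posnum], posnum))
    ([0], 0)).1

-- ===== PORT B =====
def get_position_numbers_alt (signal_list : List Int) : List Int :=
  let n : Int := signal_list.length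
  let rise := (PySem.List.pyRange 1 n).map (fun i =>
    if PySem.List.pyGetD signal_list i 0 ≠ 0 ∧ PySem.List.pyGetD signal_list (i - 1) 0 = 0
    then (1 : Int) else 0)
  let pre := (rise.foldl (fun (st : List Int × Int) r => (st.1 ++ [st.2 + r], st.2 + r)) ([], 0)).1
  [0] ++ (PySem.List.pyRange 1 n).map (fun i =>
    if PySem.List.pyGetD signal_list i 0 = 0 then 0 else PySem.List.pyGetD pre (i - 1) 0)

-- ===== PRECONDITION & SPEC =====
def Spec_get_position_numbers (signal_list : List Int) (out : List Int) : Prop := out = get_position_numbers_alt signal_list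
instance (signal_list : List Int) (out : List Int) : Decidable (Spec_get_position_numbers signal_list out) := by unfold Spec_get_position_numbers; infer_instance

-- ===== CLAIM (what is proved, stated in full; the proofs are below) =====
def Claim_equal_get_position_numbers : Prop := ∀ (signal_list : List Int), Dom_get_position_numbers signal_list → Spec_get_position_numbers signal_list (get_position_numbers signal_list)

-- ===== LEMMAS AND PROOFS =====

-- the rise indicator at index i (1 iff signal goes 0 -> nonzero entering i)
def riseF (xs : List Int) (i : Int) : Int :=
  if PySem.List.pyGetD xs i 0 ≠ 0 ∧ PySem.List.pyGetD xs (i - 1) 0 = 0 then 1 else 0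

-- number of rises among indices 1 .. b-1
def cnt (xs : List Int) (b : Int) : Int := ((PySem.List.pyRange 1 b).map (riseF xs)).sum

-- the common per-index output value
def gfun (xs : List Int) (i : Int) : Int :=
  if PySem.List.pyGetD xs i 0 = 0 then 0 else cnt xs (i + 1)

lemma cnt_succ (xs : List Int) (b : Int) (h : 1 ≤ b) :
    cnt xs (b + 1) = cnt xs b + riseF xs b := by
  simp [cnt, PySem.List.pyRange_one_succ_right h]

-- A's fold over indices 1..m-1 yields ([0] ++ values, rise count)
lemma foldA_eq (xs : List Int) (m : Nat) :
    (PySem.List.pyRange 1 (m : Int)).foldl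
      (fun (st : List Int × Int) i =>
        if PySem.List.pyGetD xs i 0 = 0 then (st.1 ++ [(0 : Int)], st.2)
        else
          let posnum := if PySem.List.pyGetD xs (i - 1) 0 = 0 then st.2 + 1 else st.2
          (st.1 ++ [posnum], posnum))
      ([0], 0)
    = ([0] ++ (PySem.List.pyRange 1 (m : Int)).map (gfun xs), cnt xs m) := by
  induction m with
  | zero => simp [PySem.List.pyRange, cnt]
  | succ m ih =>
    rcases Nat.eq_zero_or_pos m with hm | hm
    · subst hm
      norm_num [PySem.List.pyRange, cnt]
    · have h1 : (1 : Int) ≤ (m : Int) := by exact_mod_cast hm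
      have hr : PySem.List.pyRange 1 ((m : Int) + 1) = PySem.List.pyRange 1 (m : Int) ++ [(m : Int)] :=
        PySem.List.pyRange_one_succ_right h1
      push_cast
      rw [hr, List.foldl_append, ih, List.map_append]
      have hval : cnt xs ((m : Int) + 1) = cnt xs (m : Int) + riseF xs (m : Int) := cnt_succ xs _ h1
      by_cases h0 : xs[m]?.getD 0 = 0
      · have hrise : riseF xs (m : Int) = 0 := by simp [riseF, h0]
        simp [List.foldl, h0, hval, hrise, gfun]
      · by_cases hp : PySem.List.pyGetD xs ((m : Int) - 1) 0 = 0
        · have hrise : riseF xs (m : Int) = 1 := by simp [riseF, h0, hp]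
          simp [List.foldl, h0, hp, gfun, hval, hrise]
        · have hrise : riseF xs (m : Int) = 0 := by simp [riseF, h0, hp]
          simp [List.foldl, h0, hp, gfun, hval, hrise]

-- the prefix-sum fold over the rise list yields the cumulative counts
lemma foldPre_eq (xs : List Int) (m : Nat) :
    ((PySem.List.pyRange 1 (m : Int)).map (riseF xs)).foldl
      (fun (st : List Int × Int) r => (st.1 ++ [st.2 + r], st.2 + r)) ([], 0)
    = ((PySem.List.pyRange 1 (m : Int)).map (fun i => cnt xs (i + 1)), cnt xs m) := by
  induction m with
  | zero => simp [PySem.List.pyRange, cnt]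
  | succ m ih =>
    rcases Nat.eq_zero_or_pos m with hm | hm
    · subst hm
      norm_num [PySem.List.pyRange, cnt]
    · have h1 : (1 : Int) ≤ (m : Int) := by exact_mod_cast hm
      have hr : PySem.List.pyRange 1 ((m : Int) + 1) = PySem.List.pyRange 1 (m : Int) ++ [(m : Int)] :=
        PySem.List.pyRange_one_succ_right h1
      push_cast
      rw [hr, List.map_append, List.foldl_append, ih, List.map_append]
      simp [List.foldl, cnt_succ xs (m : Int) h1]

-- ===== VERDICT (by name: the statement is the Claim_ definition above) =====
theorem get_position_numbers_spec : Claim_equal_get_position_numbers := by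
  intro xs _
  unfold Spec_get_position_numbers get_position_numbers get_position_numbers_alt
  rw [foldA_eq xs xs.length]
  have hpre : ((PySem.List.pyRange 1 (xs.length : Int)).map (riseF xs)).foldl
      (fun (st : List Int × Int) r => (st.1 ++ [st.2 + r], st.2 + r)) ([], 0)
      = ((PySem.List.pyRange 1 (xs.length : Int)).map (fun i => cnt xs (i + 1)), cnt xs xs.length) :=
    foldPre_eq xs xs.length
  simp only []
  rw [show ((PySem.List.pyRange 1 (xs.length : Int)).map (fun i =>
      if PySem.List.pyGetD xs i 0 ≠ 0 ∧ PySem.List.pyGetD xs (i - 1) 0 = 0 then (1 : Int) else 0))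
      = (PySem.List.pyRange 1 (xs.length : Int)).map (riseF xs) from rfl]
  rw [hpre]
  congr 1
  apply List.map_congr_left
  intro i hi
  have hib : 1 ≤ i ∧ i < (xs.length : Int) := PySem.List.mem_pyRange_one.mp hi
  by_cases h0 : PySem.List.pyGetD xs i 0 = 0
  · simp [gfun, h0]
  · have hk : i - 1 = ((i - 1).toNat : Int) := by omega
    have hkl : (i - 1).toNat < ((xs.length : Int) - 1).toNat := by omega
    have := PySem.List.pyGetD_map_pyRange_one (fun i => cnt xs (i + 1)) 1 (xs.length : Int)
      (i - 1).toNat 0 hkl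
    simp [gfun, h0]
    rw [hk, this]
    congr 1
    omega
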